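-- pv_equiv track=rewrite | github.com/darlington72/SRU_com | lib.py | compute_CRC
-- ===== SOURCE A (Python) =====
-- def compute_CRC(frame):
--     crc_poly = 0xD5
--     crc = 0
--
--     for byte in frame:
--         for _ in range(8):
--             if (byte & 0x80) ^ (crc & 0x80):
--                 crc = (crc << 1) ^ crc_poly
--             else:
--                 crc = crc << 1
--             byte = byte << 1
--
--     return crc % (2 ** 8)
-- ===== SOURCE B (Python) =====
-- def _crc_entry(x):
--     crc = x
--     for _ in range(8):
--         if crc & 0x80:
--             crc = ((crc << 1) ^ 0xD5) & 0xFF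
--         else:
--             crc = (crc << 1) & 0xFF
--     return crc
--
--
-- _CRC_TABLE = [_crc_entry(x) for x in range(256)]
--
--
-- def compute_CRC(frame):
--     crc = 0
--     for byte in frame:
--         crc = _CRC_TABLE[(crc ^ byte) & 0xFF]
--     return crc
-- ===== Notes on version B (the rewrite author's own statement) =====
-- stated objective: faster
-- what changed: Replaces the per-byte 8-iteration shift/XOR bit loop (whose running crc grows into an ever-larger bignum, only masked at the end) with a 256-entry CRC lookup table built once and a single pass keeping crc in 0..255 with one table lookup per byte.
import Mathlib
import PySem

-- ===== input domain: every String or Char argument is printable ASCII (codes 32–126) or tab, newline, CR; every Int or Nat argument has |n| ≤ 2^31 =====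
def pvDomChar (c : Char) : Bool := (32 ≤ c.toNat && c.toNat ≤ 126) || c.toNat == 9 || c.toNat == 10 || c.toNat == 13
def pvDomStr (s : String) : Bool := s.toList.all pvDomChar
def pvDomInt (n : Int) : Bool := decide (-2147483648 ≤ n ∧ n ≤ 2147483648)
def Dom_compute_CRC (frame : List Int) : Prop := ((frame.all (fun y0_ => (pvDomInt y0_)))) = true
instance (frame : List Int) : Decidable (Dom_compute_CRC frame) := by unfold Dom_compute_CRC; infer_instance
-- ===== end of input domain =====

set_option maxRecDepth 4096

-- B replaces A's per-byte 8-iteration shift/XOR bit loop by a 256-entry lookup table built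
-- once, processing the frame in one pass with one table lookup per byte (objective: faster).


-- ===== PORT A =====
-- literal transliteration of A: nested loops, unbounded crc; `x << 1` is ported as
-- `x <<< (1 : Nat)` and `&`/`^`/`%` as PySem.Int.band/bxor/mod (Python-exact, also on negatives)
def compute_CRC (frame : List Int) : Int :=
  let crcPoly : Int := 213
  let crc : Int := 0
  let crc := frame.foldl (fun crc byte =>
    ((List.range 8).foldl (fun (st : Int × Int) _ =>
      let byte := st.1
      let crc := st.2
      let crc := if PySem.Int.bxor (PySem.Int.band byte 128) (PySem.Int.band crc 128) ≠ 0
        then PySem.Int.bxor (crc <<< (1 : Nat)) crcPoly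
        else crc <<< (1 : Nat)
      let byte := byte <<< (1 : Nat)
      (byte, crc)) (byte, crc)).2) crc
  PySem.Int.mod crc 256


-- ===== PORT B =====
-- helper _crc_entry of Source B
def crc_entry (x : Int) : Int :=
  (List.range 8).foldl (fun crc _ =>
    if PySem.Int.band crc 128 ≠ 0 then
      PySem.Int.band (PySem.Int.bxor (crc <<< (1 : Nat)) 213) 255
    else
      PySem.Int.band (crc <<< (1 : Nat)) 255) x

-- _CRC_TABLE = [_crc_entry(x) for x in range(256)]
def crcTable : List Int := (List.range 256).map (fun x => crc_entry (Int.ofNat x))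

-- _CRC_TABLE[(crc ^ byte) & 0xFF]: the index is provably in [0, 255], so the Python list
-- indexing is ported as .getD .toNat (exact on every input: no IndexError is reachable)
def compute_CRC_alt (frame : List Int) : Int :=
  frame.foldl (fun crc byte =>
    crcTable.getD (PySem.Int.band (PySem.Int.bxor crc byte) 255).toNat 0) 0

-- ===== PRECONDITION & SPEC =====
def Spec_compute_CRC (frame : List Int) (out : Int) : Prop := out = compute_CRC_alt frame
instance (frame : List Int) (out : Int) : Decidable (Spec_compute_CRC frame out) := by unfold Spec_compute_CRC; infer_instance

-- ===== CLAIM (what is proved, stated in full; the proofs are below) =====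
def Claim_equal_compute_CRC : Prop := ∀ (frame : List Int), Dom_compute_CRC frame → Spec_compute_CRC frame (compute_CRC frame)

-- ===== LEMMAS AND PROOFS =====

theorem natAnd255 (a : Nat) : a &&& 255 = a % 256 := by
  simpa using Nat.and_two_pow_sub_one_eq_mod a 8

theorem natModAnd128 (a : Nat) : (a % 256) &&& 128 = a &&& 128 := by
  apply Nat.eq_of_testBit_eq
  intro i
  rw [show (256 : Nat) = 2 ^ 8 from rfl, show (128 : Nat) = 2 ^ 7 from rfl]
  simp only [Nat.testBit_and, Nat.testBit_mod_two_pow, Nat.testBit_two_pow]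
  by_cases h : 7 = i
  · subst h; simp
  · simp [h]

theorem natSub128 (r : Nat) (h : r < 256) : 128 - (128 &&& r) = (255 - r) &&& 128 := by
  have H : ∀ r : Fin 256, 128 - (128 &&& r.val) = (255 - r.val) &&& 128 := by decide
  exact H ⟨r, h⟩

theorem natModXor (a b : Nat) : (a % 256) ^^^ (b % 256) = (a ^^^ b) % 256 := by
  apply Nat.eq_of_testBit_eq
  intro i
  rw [show (256 : Nat) = 2 ^ 8 from rfl]
  simp only [Nat.testBit_xor, Nat.testBit_mod_two_pow]
  cases a.testBit i <;> cases b.testBit i <;> by_cases h : i < 8 <;> simp [h]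

theorem natSub255 (r : Nat) (h : r < 256) : 255 - r = 255 ^^^ r := by
  have H : ∀ r : Fin 256, 255 - r.val = 255 ^^^ r.val := by decide
  exact H ⟨r, h⟩

theorem natAnd128Xor (a b : Nat) : (a &&& 128) ^^^ (b &&& 128) = (a ^^^ b) &&& 128 := by
  apply Nat.eq_of_testBit_eq
  intro i
  simp only [Nat.testBit_xor, Nat.testBit_and]
  cases a.testBit i <;> cases b.testBit i <;> cases (128 : Nat).testBit i <;> rfl

theorem natDouble_xor (a b : Nat) : (2 * a) ^^^ (2 * b) = 2 * (a ^^^ b) := by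
  have h : ∀ x : Nat, 2 * x = x <<< 1 := fun x => by rw [Nat.shiftLeft_eq]; ring
  rw [h, h, h]
  apply Nat.eq_of_testBit_eq
  intro i
  simp only [Nat.testBit_xor, Nat.testBit_shiftLeft]
  by_cases hi : i ≥ 1 <;> simp [hi]

-- residue of an Int modulo 256, as a Nat

theorem band255_eq_emod (x : Int) : PySem.Int.band x 255 = x % 256 := by
  unfold PySem.Int.band
  have h1 : Int.toNat 255 = 255 := rfl
  by_cases hx : 0 ≤ x
  · rw [if_pos hx, if_pos (by norm_num : (0:Int) ≤ 255), h1, natAnd255]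
    omega
  · rw [if_neg hx, if_pos (by norm_num : (0:Int) ≤ 255), h1, Nat.and_comm, natAnd255]
    omega

theorem band128_eq (x : Int) : PySem.Int.band x 128 = ((x % 256).toNat &&& 128 : Nat) := by
  unfold PySem.Int.band
  have h1 : Int.toNat 128 = 128 := rfl
  by_cases hx : 0 ≤ x
  · rw [if_pos hx, if_pos (by norm_num : (0:Int) ≤ 128), h1]
    have hr : (x % 256).toNat = x.toNat % 256 := by omega
    rw [hr, natModAnd128]
  · rw [if_neg hx, if_pos (by norm_num : (0:Int) ≤ 128), h1]
    set m := (-x - 1).toNat with hm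
    have hr : (x % 256).toNat = 255 - m % 256 := by omega
    rw [hr, Nat.and_comm 128 m, ← natModAnd128 m, Nat.and_comm (m % 256) 128,
      natSub128 (m % 256) (by omega)]

theorem bxor_emod (x y : Int) :
    PySem.Int.bxor x y % 256 = ((x % 256).toNat ^^^ (y % 256).toNat : Nat) := by
  unfold PySem.Int.bxor
  by_cases hx : 0 ≤ x <;> by_cases hy : 0 ≤ y
  · rw [if_pos hx, if_pos hy]
    have hrx : (x % 256).toNat = x.toNat % 256 := by omega
    have hry : (y % 256).toNat = y.toNat % 256 := by omega
    rw [hrx, hry, natModXor]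
    set u := x.toNat ^^^ y.toNat
    omega
  · rw [if_pos hx, if_neg hy]
    set m := (-y - 1).toNat with hm
    have hrx : (x % 256).toNat = x.toNat % 256 := by omega
    have hry : (y % 256).toNat = 255 - m % 256 := by omega
    rw [hrx, hry, natSub255 (m % 256) (by omega)]
    have key : x.toNat % 256 ^^^ (255 ^^^ m % 256) = 255 - (x.toNat ^^^ m) % 256 := by
      rw [← Nat.xor_assoc, Nat.xor_comm (x.toNat % 256) 255, Nat.xor_assoc, natModXor,
        ← natSub255 ((x.toNat ^^^ m) % 256) (by omega)]
    rw [key]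
    set u := x.toNat ^^^ m
    omega
  · rw [if_neg hx, if_pos hy]
    set m := (-x - 1).toNat with hm
    have hrx : (x % 256).toNat = 255 - m % 256 := by omega
    have hry : (y % 256).toNat = y.toNat % 256 := by omega
    rw [hrx, hry, natSub255 (m % 256) (by omega)]
    have key : (255 ^^^ m % 256) ^^^ y.toNat % 256 = 255 - (m ^^^ y.toNat) % 256 := by
      rw [Nat.xor_assoc, natModXor, ← natSub255 ((m ^^^ y.toNat) % 256) (by omega)]
    rw [key]
    set u := m ^^^ y.toNat
    omega
  · rw [if_neg hx, if_neg hy]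
    set m1 := (-x - 1).toNat with hm1
    set m2 := (-y - 1).toNat with hm2
    have hrx : (x % 256).toNat = 255 - m1 % 256 := by omega
    have hry : (y % 256).toNat = 255 - m2 % 256 := by omega
    rw [hrx, hry, natSub255 (m1 % 256) (by omega), natSub255 (m2 % 256) (by omega)]
    have key : (255 ^^^ m1 % 256) ^^^ (255 ^^^ m2 % 256) = (m1 ^^^ m2) % 256 := by
      rw [Nat.xor_comm 255 (m1 % 256), Nat.xor_assoc, ← Nat.xor_assoc 255 255,
        Nat.xor_self, Nat.zero_xor, natModXor]
    rw [key]
    set u := m1 ^^^ m2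
    omega

def Rres (x : Int) : Nat := (x % 256).toNat

theorem band255_cast (x : Int) : PySem.Int.band x 255 = (Rres x : Int) := by
  rw [band255_eq_emod]; unfold Rres; omega

theorem Rres_bxor (x y : Int) : Rres (PySem.Int.bxor x y) = Rres x ^^^ Rres y := by
  have h := bxor_emod x y
  unfold Rres
  set u := (x % 256).toNat ^^^ (y % 256).toNat
  omega

theorem Rres_double (x : Int) : Rres (2 * x) = 2 * Rres x % 256 := by
  unfold Rres; omega

theorem Rres_band255 (x : Int) : Rres (PySem.Int.band x 255) = Rres x := by
  rw [band255_eq_emod]; unfold Rres; omega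

theorem band128_Rres (x : Int) : PySem.Int.band x 128 = ((Rres x &&& 128 : Nat) : Int) := by
  rw [band128_eq]; rfl

theorem shl1 (x : Int) : x <<< (1 : Nat) = 2 * x := by
  rw [Int.shiftLeft_eq]; ring

def stepA (st : Int × Int) : Int × Int :=
  (st.1 <<< (1 : Nat),
    if PySem.Int.bxor (PySem.Int.band st.1 128) (PySem.Int.band st.2 128) ≠ 0
    then PySem.Int.bxor (st.2 <<< (1 : Nat)) 213
    else st.2 <<< (1 : Nat))

def stepB (m : Int) : Int :=
  if PySem.Int.band m 128 ≠ 0 then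
    PySem.Int.band (PySem.Int.bxor (m <<< (1 : Nat)) 213) 255
  else
    PySem.Int.band (m <<< (1 : Nat)) 255

theorem cond_bridge (b c : Int) :
    (PySem.Int.bxor (PySem.Int.band b 128) (PySem.Int.band c 128) ≠ 0)
      ↔ (PySem.Int.band (PySem.Int.band (PySem.Int.bxor c b) 255) 128 ≠ 0) := by
  rw [band128_Rres b, band128_Rres c, PySem.Int.bxor_natCast,
    band128_Rres (PySem.Int.band (PySem.Int.bxor c b) 255), Rres_band255, Rres_bxor,
    natAnd128Xor, Nat.xor_comm (Rres b) (Rres c)]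

theorem step_bridge (b c : Int) :
    PySem.Int.band (PySem.Int.bxor (stepA (b, c)).2 (stepA (b, c)).1) 255
      = stepB (PySem.Int.band (PySem.Int.bxor c b) 255) := by
  show PySem.Int.band (PySem.Int.bxor
      (if PySem.Int.bxor (PySem.Int.band b 128) (PySem.Int.band c 128) ≠ 0
       then PySem.Int.bxor (c <<< (1 : Nat)) 213 else c <<< (1 : Nat))
      (b <<< (1 : Nat))) 255
    = if PySem.Int.band (PySem.Int.band (PySem.Int.bxor c b) 255) 128 ≠ 0
      then PySem.Int.band (PySem.Int.bxor ((PySem.Int.band (PySem.Int.bxor c b) 255) <<< (1 : Nat)) 213) 255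
      else PySem.Int.band ((PySem.Int.band (PySem.Int.bxor c b) 255) <<< (1 : Nat)) 255
  by_cases hA : PySem.Int.bxor (PySem.Int.band b 128) (PySem.Int.band c 128) ≠ 0
  · have hB := (cond_bridge b c).mp hA
    rw [if_pos hA, if_pos hB]
    simp only [shl1]
    rw [band255_cast, band255_cast]
    congr 1
    simp only [Rres_bxor, Rres_double, Rres_band255]
    have h213 : Rres (213 : Int) = 213 := rfl
    rw [h213, Nat.xor_comm (2 * Rres c % 256) 213, Nat.xor_assoc, natModXor, natDouble_xor,
      Nat.xor_comm 213 _]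
  · have hB : ¬ PySem.Int.band (PySem.Int.band (PySem.Int.bxor c b) 255) 128 ≠ 0 :=
      fun h => hA ((cond_bridge b c).mpr h)
    rw [if_neg hA, if_neg hB]
    simp only [shl1]
    rw [band255_cast, band255_cast]
    congr 1
    simp only [Rres_bxor, Rres_double, Rres_band255]
    rw [natModXor, natDouble_xor]

theorem iterate_bridge (k : Nat) (b c : Int) :
    PySem.Int.band (PySem.Int.bxor (stepA^[k] (b, c)).2 (stepA^[k] (b, c)).1) 255
      = stepB^[k] (PySem.Int.band (PySem.Int.bxor c b) 255) := by
  induction k generalizing b c with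
  | zero => rfl
  | succ k ih =>
    rw [Function.iterate_succ_apply, Function.iterate_succ_apply]
    have h := ih (stepA (b, c)).1 (stepA (b, c)).2
    rw [Prod.mk.eta] at h
    rw [h, step_bridge]

theorem foldl_const {α : Type} (f : α → α) (l : List Nat) (init : α) :
    l.foldl (fun s _ => f s) init = f^[l.length] init := by
  induction l generalizing init with
  | nil => rfl
  | cons x xs ih => simpa [Function.iterate_succ_apply] using ih (f init)

theorem fst_stepA_iterate (k : Nat) (b c : Int) :
    (stepA^[k] (b, c)).1 = b * 2 ^ k := by
  induction k generalizing b c with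
  | zero => simp
  | succ k ih =>
    rw [Function.iterate_succ_apply]
    show (stepA^[k] ((stepA (b, c)).1, (stepA (b, c)).2)).1 = _
    rw [ih]
    show b <<< (1 : Nat) * 2 ^ k = b * 2 ^ (k + 1)
    rw [shl1]; ring

theorem perByte (b c : Int) :
    PySem.Int.band (stepA^[8] (b, c)).2 255
      = stepB^[8] (PySem.Int.band (PySem.Int.bxor c b) 255) := by
  rw [← iterate_bridge 8 b c]
  rw [band255_cast, band255_cast]
  congr 1
  rw [Rres_bxor, fst_stepA_iterate]
  have h0 : Rres (b * 2 ^ 8) = 0 := by unfold Rres; omega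
  rw [h0, Nat.xor_zero]

theorem band255_nonneg (x : Int) : 0 ≤ PySem.Int.band x 255 := by
  rw [band255_eq_emod]; omega

theorem band255_lt (x : Int) : PySem.Int.band x 255 < 256 := by
  rw [band255_eq_emod]; omega

theorem table_getD (n : Nat) (h : n < 256) : crcTable.getD n 0 = crc_entry n := by
  have hlen : n < crcTable.length := by
    rw [crcTable, List.length_map, List.length_range]; exact h
  rw [List.getD_eq_getElem?_getD, List.getElem?_eq_getElem hlen, Option.getD_some]
  simp only [crcTable, List.getElem_map, List.getElem_range]
  rfl

theorem crc_entry_iterate (x : Int) : crc_entry x = stepB^[8] x := by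
  show (List.range 8).foldl (fun s _ => stepB s) x = stepB^[8] x
  simpa using foldl_const stepB (List.range 8) x

theorem index_congr (c b : Int) :
    PySem.Int.band (PySem.Int.bxor (PySem.Int.band c 255) b) 255
      = PySem.Int.band (PySem.Int.bxor c b) 255 := by
  rw [band255_cast (PySem.Int.bxor (PySem.Int.band c 255) b),
    band255_cast (PySem.Int.bxor c b)]
  congr 1
  rw [Rres_bxor, Rres_bxor, Rres_band255]

theorem A_unfold (frame : List Int) :
    compute_CRC frame
      = PySem.Int.mod (frame.foldl (fun crc byte => (stepA^[8] (byte, crc)).2) 0) 256 := by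
  show PySem.Int.mod (frame.foldl (fun crc byte =>
      ((List.range 8).foldl (fun st _ => stepA st) (byte, crc)).2) 0) 256 = _
  have h : ∀ (crc byte : Int),
      ((List.range 8).foldl (fun st _ => stepA st) (byte, crc)) = stepA^[8] (byte, crc) := by
    intro crc byte
    simpa using foldl_const stepA (List.range 8) (byte, crc)
  simp only [h]

theorem main_fold (frame : List Int) (c : Int) :
    frame.foldl (fun crc byte =>
        crcTable.getD (PySem.Int.band (PySem.Int.bxor crc byte) 255).toNat 0)
      (PySem.Int.band c 255)
      = PySem.Int.band (frame.foldl (fun crc byte => (stepA^[8] (byte, crc)).2) c) 255 := by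
  induction frame generalizing c with
  | nil => rfl
  | cons b fr ih =>
    simp only [List.foldl_cons]
    have hidx : (PySem.Int.band (PySem.Int.bxor (PySem.Int.band c 255) b) 255).toNat < 256 := by
      have := band255_lt (PySem.Int.bxor (PySem.Int.band c 255) b)
      omega
    rw [table_getD _ hidx]
    have hcast : ((PySem.Int.band (PySem.Int.bxor (PySem.Int.band c 255) b) 255).toNat : Int)
        = PySem.Int.band (PySem.Int.bxor (PySem.Int.band c 255) b) 255 := by
      have := band255_nonneg (PySem.Int.bxor (PySem.Int.band c 255) b)
      omega
    rw [hcast, index_congr, crc_entry_iterate, ← perByte b c, ← ih]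

theorem compute_CRC_eq (frame : List Int) : compute_CRC frame = compute_CRC_alt frame := by
  rw [A_unfold]
  rw [PySem.Int.mod_eq_emod_of_pos (by norm_num : (0:Int) < 256)]
  rw [← band255_eq_emod, ← main_fold]
  have h0 : PySem.Int.band 0 255 = 0 := by decide
  rw [h0]
  rfl

-- ===== VERDICT (by name: the statement is the Claim_ definition above) =====
theorem compute_CRC_spec : Claim_equal_compute_CRC := by
  intro frame _
  show compute_CRC frame = compute_CRC_alt frame
  exact compute_CRC_eq frame
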